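-- pv_equiv track=rewrite | github.com/ct2034/miriam | planner/cbs_ext_test.py | has_vortex_collision
-- ===== SOURCE A (Python) =====
-- from functools import reduce
--
-- def has_vortex_collision(paths):
--     vortexes = {}
--     for agent_paths in paths:
--         if len(agent_paths) > 1:
--             path = reduce(lambda a, b: a + b, agent_paths)
--         else:
--             path = agent_paths[0]
--         for i in range(len(path)):
--             vortex = path[i][:2]
--             t = path[i][2]
--             if t in vortexes.keys():
--                 if vortex in vortexes[t]:
--                     return True
--                 else:
--                     vortexes[t].append(vortex)
--             else:
--                 vortexes[t] = []
--                 vortexes[t].append(vortex)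
--     return False
-- ===== SOURCE B (Python) =====
-- def has_vortex_collision(paths):
--     # Build the full list of (x, y, t) collision keys first, then make one
--     # separate decision pass: a collision means some key occurs twice.
--     keys = []
--     for agent_paths in paths:
--         for path in agent_paths:
--             for point in path:
--                 keys.append((point[0], point[1], point[2]))
--     return len(set(keys)) < len(keys)
-- ===== Notes on version B (the rewrite author's own statement) =====
-- stated objective: simpler
-- what changed: Instead of interleaving a dict-of-lists per time step with an early return inside the scan, B first flattens all agents' points into one list of (x,y,t) keys and then decides collision in a single separate pass by comparing len(set(keys)) with len(keys).
import Mathlib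
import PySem

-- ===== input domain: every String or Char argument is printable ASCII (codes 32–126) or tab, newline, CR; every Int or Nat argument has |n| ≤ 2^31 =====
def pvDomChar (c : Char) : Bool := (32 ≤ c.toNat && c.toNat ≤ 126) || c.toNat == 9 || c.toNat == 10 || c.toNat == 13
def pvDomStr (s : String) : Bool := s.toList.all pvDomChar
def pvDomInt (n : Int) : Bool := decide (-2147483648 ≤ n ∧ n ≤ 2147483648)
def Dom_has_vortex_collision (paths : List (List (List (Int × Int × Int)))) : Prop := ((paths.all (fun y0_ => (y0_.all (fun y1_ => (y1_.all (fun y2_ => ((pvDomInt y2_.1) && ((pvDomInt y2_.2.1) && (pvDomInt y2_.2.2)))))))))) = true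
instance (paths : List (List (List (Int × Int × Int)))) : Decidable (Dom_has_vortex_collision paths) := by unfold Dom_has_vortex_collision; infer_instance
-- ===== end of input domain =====

-- B flattens all points into one key list and decides collision in a separate
-- set-size pass, instead of A's interleaved dict-of-lists scan with early return (objective: simpler).

-- ===== PORT A =====
-- inner loop 'for i in range(len(path)): …' with the early 'return True' modelled
-- as 'none'; 'some d' carries the updated 'vortexes' dict to the next iteration
def pvAInner : List (Int × Int × Int) → PySem.Dict Int (List (Int × Int)) →
    Option (PySem.Dict Int (List (Int × Int)))
  | [], d => some d
  | p :: rest, d =>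
    let vortex : Int × Int := (p.1, p.2.1)     -- path[i][:2]
    let t : Int := p.2.2                        -- path[i][2]
    match d.get? t with                         -- t in vortexes.keys()
    | some l =>
        if vortex ∈ l then none                 -- return True
        else pvAInner rest (d.insert t (l ++ [vortex]))   -- vortexes[t].append(vortex)
    | none => pvAInner rest (d.insert t [vortex])          -- vortexes[t] = []; append

-- outer loop 'for agent_paths in paths'
def pvAOuter : List (List (List (Int × Int × Int))) → PySem.Dict Int (List (Int × Int)) → Bool
  | [], _ => false
  | agent :: rest, d =>
    let path : List (Int × Int × Int) :=
      if agent.length > 1 then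
        agent.tail.foldl (· ++ ·) (agent.headD [])   -- reduce(lambda a, b: a + b, agent_paths)
      else
        (PySem.List.pyGet? agent 0).getD []          -- agent_paths[0]; IndexError (agent = []) excluded by Pre_
    match pvAInner path d with
    | none => true
    | some d' => pvAOuter rest d'

def has_vortex_collision (paths : List (List (List (Int × Int × Int)))) : Bool :=
  pvAOuter paths PySem.Dict.empty

-- ===== PORT B =====
def has_vortex_collision_alt (paths : List (List (List (Int × Int × Int)))) : Bool :=
  let keys : List (Int × Int × Int) :=
    paths.flatMap (fun agent => agent.flatMap (fun path => path.map (fun p => (p.1, p.2.1, p.2.2))))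
  decide ((PySem.Set.ofList keys).length < keys.length)

-- ===== PRECONDITION & SPEC =====
-- A raises IndexError when some agent's segment list is empty (agent_paths[0] on []); exactly those inputs are excluded.
def Pre_has_vortex_collision (paths : List (List (List (Int × Int × Int)))) : Prop :=
  ∀ agent ∈ paths, agent ≠ []
instance (paths : List (List (List (Int × Int × Int)))) : Decidable (Pre_has_vortex_collision paths) := by unfold Pre_has_vortex_collision; infer_instance
def pvWitness_has_vortex_collision : (List (List (List (Int × Int × Int)))) := [[[(0, 0, 0)]]]

def Spec_has_vortex_collision (paths : List (List (List (Int × Int × Int)))) (out : Bool) : Prop := out = has_vortex_collision_alt paths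
instance (paths : List (List (List (Int × Int × Int)))) (out : Bool) : Decidable (Spec_has_vortex_collision paths out) := by unfold Spec_has_vortex_collision; infer_instance

-- ===== CLAIM (what is proved, stated in full; the proofs are below) =====
def Claim_equal_has_vortex_collision : Prop := ∀ (paths : List (List (List (Int × Int × Int)))), Dom_has_vortex_collision paths → Pre_has_vortex_collision paths → Spec_has_vortex_collision paths (has_vortex_collision paths)
-- ===== LEMMAS AND PROOFS =====

-- 'a key was already seen at its time step', read off the dict
def pvSeen (d : PySem.Dict Int (List (Int × Int))) (p : Int × Int × Int) : Prop :=
  match d.get? p.2.2 with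
  | some l => (p.1, p.2.1) ∈ l
  | none => False

-- the dict update performed for one non-colliding key
def pvStep (d : PySem.Dict Int (List (Int × Int))) (p : Int × Int × Int) :
    PySem.Dict Int (List (Int × Int)) :=
  match d.get? p.2.2 with
  | some l => d.insert p.2.2 (l ++ [(p.1, p.2.1)])
  | none => d.insert p.2.2 [(p.1, p.2.1)]

lemma pvSeen_step (d : PySem.Dict Int (List (Int × Int))) (q p : Int × Int × Int) :
    pvSeen (pvStep d q) p ↔ pvSeen d p ∨ p = q := by
  have hpq : p = q ↔ (p.2.2 = q.2.2 ∧ (p.1, p.2.1) = (q.1, q.2.1)) := by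
    constructor
    · rintro rfl; exact ⟨rfl, rfl⟩
    · rintro ⟨h1, h2⟩
      obtain ⟨pa, pb, pc⟩ := p; obtain ⟨qa, qb, qc⟩ := q
      simp_all
  unfold pvStep
  by_cases ht : p.2.2 = q.2.2
  · cases hg : d.get? q.2.2 with
    | some l =>
        simp only [hg, pvSeen, ht, PySem.Dict.get?_insert_self, List.mem_append,
          List.mem_singleton, hpq]
        tauto
    | none =>
        have : pvSeen d p ↔ False := by unfold pvSeen; rw [ht, hg]
        simp only [hg, pvSeen, ht, PySem.Dict.get?_insert_self, List.mem_singleton, hpq]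
        tauto
  · have hne : p = q → False := fun h => ht (by rw [h])
    cases hg : d.get? q.2.2 with
    | some l =>
        simp only [pvSeen, PySem.Dict.get?_insert_of_ne d _ ht]
        tauto
    | none =>
        simp only [pvSeen, PySem.Dict.get?_insert_of_ne d _ ht]
        tauto

-- characterisation of the inner scan: it returns 'none' (Python's 'return True')
-- iff the key list has an internal duplicate or repeats something already in d
lemma pvAInner_none_iff (keys : List (Int × Int × Int)) :
    ∀ d, pvAInner keys d = none ↔ ¬ (keys.Nodup ∧ ∀ p ∈ keys, ¬ pvSeen d p) := by
  induction keys with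
  | nil => intro d; simp [pvAInner]
  | cons p rest ih =>
    intro d
    by_cases hs : pvSeen d p
    · have : pvAInner (p :: rest) d = none := by
        unfold pvAInner
        revert hs; unfold pvSeen
        cases hg : d.get? p.2.2 with
        | some l => intro hs; simp_all
        | none => intro hs; simp_all
      simp only [this, true_iff]
      intro ⟨_, hall⟩; exact hall p (List.mem_cons_self) hs
    · have hstep : pvAInner (p :: rest) d = pvAInner rest (pvStep d p) := by
        unfold pvAInner pvStep
        revert hs; unfold pvSeen
        cases hg : d.get? p.2.2 with
        | some l => intro hs; simp_all; exact pvAInner.eq_def _ _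
        | none => intro hs; simp_all; exact pvAInner.eq_def _ _
      rw [hstep, ih (pvStep d p)]
      constructor
      · intro h hc
        obtain ⟨hnd, hall⟩ := hc
        apply h
        refine ⟨(List.nodup_cons.mp hnd).2, fun q hq hsq => ?_⟩
        rcases (pvSeen_step d p q).mp hsq with h1 | h1
        · exact hall q (List.mem_cons_of_mem _ hq) h1
        · exact (List.nodup_cons.mp hnd).1 (h1 ▸ hq)
      · intro h hc
        obtain ⟨hnd, hall⟩ := hc
        apply h
        constructor
        · rw [List.nodup_cons]
          refine ⟨fun hmem => ?_, hnd⟩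
          exact hall p hmem ((pvSeen_step d p p).mpr (Or.inr rfl))
        · intro q hq hsq
          rcases List.mem_cons.mp hq with rfl | hq'
          · exact hs hsq
          · exact hall q hq' ((pvSeen_step d p q).mpr (Or.inl hsq))

-- the inner scan over a concatenation is the scan over the first part bound to the second
lemma pvAInner_append (xs ys : List (Int × Int × Int)) :
    ∀ d, pvAInner (xs ++ ys) d = (pvAInner xs d).bind (fun d' => pvAInner ys d') := by
  induction xs with
  | nil => intro d; simp [pvAInner]
  | cons p rest ih =>
    intro d
    show pvAInner (p :: (rest ++ ys)) d = _
    simp only [pvAInner]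
    cases hg : d.get? p.2.2 with
    | some l =>
        by_cases hv : (p.1, p.2.1) ∈ l
        · simp [hv]
        · simp only [hv, if_false]; exact ih _
    | none => exact ih _

-- the per-agent 'path' A computes equals the agent's flattened segment list (agent ≠ [])
lemma pvFoldl_append (l : List (List (Int × Int × Int))) :
    ∀ a : List (Int × Int × Int), l.foldl (· ++ ·) a = a ++ l.flatten := by
  induction l with
  | nil => intro a; simp
  | cons x rest ih => intro a; simp [List.foldl_cons, ih, List.append_assoc]

lemma pvPath_eq_flatten (agent : List (List (Int × Int × Int))) (h : agent ≠ []) :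
    (if agent.length > 1 then agent.tail.foldl (· ++ ·) (agent.headD [])
     else (PySem.List.pyGet? agent 0).getD []) = agent.flatten := by
  cases agent with
  | nil => exact absurd rfl h
  | cons s rest =>
    cases rest with
    | nil => simp [PySem.List.pyGet?, PySem.List.pyIdx?]
    | cons s2 rest2 =>
      have : (s :: s2 :: rest2).length > 1 := by simp
      rw [if_pos this]
      simp [pvFoldl_append]

-- the outer loop equals the inner scan over all agents' flattened points
lemma pvAOuter_eq (paths : List (List (List (Int × Int × Int)))) :
    ∀ d, (∀ agent ∈ paths, agent ≠ []) →
      pvAOuter paths d = (pvAInner (paths.flatMap List.flatten) d).isNone := by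
  induction paths with
  | nil => intro d _; simp [pvAOuter, pvAInner]
  | cons agent rest ih =>
    intro d hpre
    have hagent : agent ≠ [] := hpre agent (List.mem_cons_self)
    show pvAOuter (agent :: rest) d = _
    unfold pvAOuter
    rw [pvPath_eq_flatten agent hagent]
    rw [List.flatMap_cons, pvAInner_append]
    cases hg : pvAInner agent.flatten d with
    | none => simp [hg]
    | some d' =>
        simp only [hg, Option.bind_some]
        exact ih d' (fun a ha => hpre a (List.mem_cons_of_mem _ ha))

-- pvSeen on the empty dict is always false
lemma pvSeen_empty (p : Int × Int × Int) : ¬ pvSeen PySem.Dict.empty p := by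
  unfold pvSeen
  simp [PySem.Dict.get?_empty]

-- B's set-size test decides exactly Nodup
lemma pvOfList_sublist {α : Type} [BEq α] [LawfulBEq α] (xs : List α) :
    (PySem.Set.ofList xs).Sublist xs := by
  induction xs with
  | nil => simp [PySem.Set.ofList]
  | cons x rest ih =>
    rw [PySem.Set.ofList_cons]
    exact List.Sublist.cons₂ x ((List.filter_sublist).trans ih)

lemma pvSetSize_lt_iff {α : Type} [BEq α] [LawfulBEq α] (xs : List α) :
    (PySem.Set.ofList xs).length < xs.length ↔ ¬ xs.Nodup := by
  constructor
  · intro hlt hnd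
    rw [PySem.Set.ofList_eq_self_of_nodup xs hnd] at hlt
    omega
  · intro hnd
    rcases Nat.lt_or_ge (PySem.Set.ofList xs).length xs.length with h | h
    · exact h
    · exfalso
      have hle := List.Sublist.length_le (pvOfList_sublist xs)
      have heq : (PySem.Set.ofList xs).length = xs.length := by omega
      have := List.Sublist.eq_of_length (pvOfList_sublist xs) heq
      exact hnd (this ▸ PySem.Set.nodup_ofList xs)

-- B's key list is the same flattened point list
lemma pvKeys_eq (paths : List (List (List (Int × Int × Int)))) :
    paths.flatMap (fun agent => agent.flatMap (fun path => path.map (fun p => (p.1, p.2.1, p.2.2))))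
      = paths.flatMap List.flatten := by
  have h1 : (fun p : Int × Int × Int => (p.1, p.2.1, p.2.2)) = id := rfl
  simp [h1, List.flatMap]

-- ===== VERDICT (by name: the statement is the Claim_ definition above) =====
-- combine: the whole scan from the empty dict answers 'is there a duplicate key'
lemma pvFinal (keys : List (Int × Int × Int)) :
    (pvAInner keys PySem.Dict.empty).isNone = decide ((PySem.Set.ofList keys).length < keys.length) := by
  have h1 : pvAInner keys PySem.Dict.empty = none ↔ ¬ keys.Nodup := by
    rw [pvAInner_none_iff]
    constructor
    · intro h hnd; exact h ⟨hnd, fun p _ => pvSeen_empty p⟩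
    · intro h hc; exact h hc.1
  by_cases hnd : keys.Nodup
  · have hne : pvAInner keys PySem.Dict.empty ≠ none := fun hn => (h1.mp hn) hnd
    cases hg : pvAInner keys PySem.Dict.empty with
    | none => exact absurd hg hne
    | some d' => simp [pvSetSize_lt_iff, hnd]
  · rw [h1.mpr hnd]
    simp [pvSetSize_lt_iff, hnd]

theorem has_vortex_collision_spec : Claim_equal_has_vortex_collision := by
  intro paths _ hpre
  unfold Spec_has_vortex_collision has_vortex_collision has_vortex_collision_alt
  simp only [pvKeys_eq, pvAOuter_eq paths PySem.Dict.empty hpre, pvFinal]
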